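-- pv_equiv track=rewrite | github.com/Tolmeton/Hegemonikon | 20_機構｜Mekhane/_src｜ソースコード/mekhane/symploke/phantazein_indexer.py | _find_best_project_match
-- ===== SOURCE A (Python) =====
-- from typing import Optional
--
-- def _find_best_project_match(
--     search_text: str,
--     project_keywords: list[tuple[str, list[str]]],
-- ) -> Optional[str]:
--     """検索テキストに最もマッチするプロジェクトの ID を返す。
--
--     マッチング優先度:
--         1. 最も長いキーワードが一致したプロジェクトを優先 (短い偽陽性を防ぐ)
--         2. 同じ長さなら最初に見つかった方
--
--     Returns:
--         マッチしたプロジェクト ID、なければ None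
--     """
--     best_pid = None
--     best_len = 0
--
--     for pid, keywords in project_keywords:
--         for kw in keywords:
--             if len(kw) < 3:
--                 # 短すぎるキーワードは偽陽性リスクが高い → スキップ
--                 continue
--             if kw in search_text:
--                 if len(kw) > best_len:
--                     best_len = len(kw)
--                     best_pid = pid
--
--     return best_pid
-- ===== SOURCE B (Python) =====
-- from typing import Optional
--
--
-- def _find_best_project_match(
--     search_text: str,
--     project_keywords: list[tuple[str, list[str]]],
-- ) -> Optional[str]:
--     # Sort-then-scan: flatten usable keywords, stably sort by length
--     # descending, then return the FIRST keyword that occurs in the text.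
--     # Stability makes equal-length keywords keep their original order, which
--     # reproduces A's strict ">" best-tracking; the scan stops at the first hit
--     # instead of substring-testing every keyword.
--     candidates = [
--         (kw, pid)
--         for pid, keywords in project_keywords
--         for kw in keywords
--         if len(kw) >= 3
--     ]
--     candidates.sort(key=lambda c: len(c[0]), reverse=True)
--     for kw, pid in candidates:
--         if kw in search_text:
--             return pid
--     return None
-- ===== Notes on version B (the rewrite author's own statement) =====
-- stated objective: alternative
-- what changed: Replaces A's exhaustive nested scan with best-so-far tracking by a stable sort of the keywords by descending length followed by an early-exit scan that returns at the first substring hit, so no max is tracked and keywords after the first maximal-length hit are never substring-tested.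
import Mathlib
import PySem

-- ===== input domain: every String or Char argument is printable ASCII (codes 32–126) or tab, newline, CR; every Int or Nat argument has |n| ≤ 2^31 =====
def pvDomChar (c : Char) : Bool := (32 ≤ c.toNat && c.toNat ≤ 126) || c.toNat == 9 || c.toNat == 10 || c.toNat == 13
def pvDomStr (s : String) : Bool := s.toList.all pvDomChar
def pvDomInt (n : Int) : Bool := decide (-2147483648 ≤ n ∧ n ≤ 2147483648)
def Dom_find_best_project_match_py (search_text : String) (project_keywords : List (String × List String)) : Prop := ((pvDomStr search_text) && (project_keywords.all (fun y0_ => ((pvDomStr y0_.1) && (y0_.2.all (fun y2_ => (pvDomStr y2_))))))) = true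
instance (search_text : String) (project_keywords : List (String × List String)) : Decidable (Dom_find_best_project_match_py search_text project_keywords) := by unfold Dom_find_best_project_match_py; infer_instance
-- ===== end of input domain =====

-- B replaces A's exhaustive best-tracking scan by a stable sort by descending keyword length followed by an early-exit first-match scan (alternative algorithm, same worst-case cost).


-- ===== PORT A =====
def find_best_project_match_py (search_text : String) (project_keywords : List (String × List String)) : Option String :=
  let r := project_keywords.foldl (fun (acc : Option String × Int) (p : String × List String) =>
    p.2.foldl (fun (acc : Option String × Int) (kw : String) =>
      if PySem.Str.len kw < 3 then acc
      else if PySem.Str.isIn kw search_text then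
        (if PySem.Str.len kw > acc.2 then (some p.1, PySem.Str.len kw) else acc)
      else acc) acc) (none, 0)
  r.1

-- ===== PORT B =====
/-- B's early-exit for-loop: return the project id of the first candidate whose keyword occurs in the text. -/
def pvFirstMatch (search_text : String) : List (String × String) → Option String
  | [] => none
  | c :: t => if PySem.Str.isIn c.1 search_text then some c.2 else pvFirstMatch search_text t

def find_best_project_match_py_alt (search_text : String) (project_keywords : List (String × List String)) : Option String :=
  let candidates := project_keywords.flatMap (fun p =>
    (p.2.filter (fun kw => decide (3 ≤ PySem.Str.len kw))).map (fun kw => (kw, p.1)))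
  pvFirstMatch search_text (PySem.List.sorted candidates (fun c => PySem.Str.len c.1) true)

-- ===== PRECONDITION & SPEC =====
def Spec_find_best_project_match_py (search_text : String) (project_keywords : List (String × List String)) (out : Option String) : Prop := out = find_best_project_match_py_alt search_text project_keywords
instance (search_text : String) (project_keywords : List (String × List String)) (out : Option String) : Decidable (Spec_find_best_project_match_py search_text project_keywords out) := by unfold Spec_find_best_project_match_py; infer_instance

-- ===== CLAIM (what is proved, stated in full; the proofs are below) =====
def Claim_equal_find_best_project_match_py : Prop := ∀ (search_text : String) (project_keywords : List (String × List String)), Dom_find_best_project_match_py search_text project_keywords → Spec_find_best_project_match_py search_text project_keywords (find_best_project_match_py search_text project_keywords)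

-- ===== LEMMAS AND PROOFS =====

/-- Candidate key: keyword length. -/
def pvKey (c : String × String) : Int := PySem.Str.len c.1

/-- Candidate predicate: keyword occurs in the text. -/
def pvP (st : String) (c : String × String) : Bool := PySem.Str.isIn c.1 st

/-- The 'before' predicate of the reverse stable sort by pvKey. -/
def pvBef (a b : String × String) : Bool := decide (pvKey b < pvKey a)

/-- A's update step on a candidate. -/
def pvStep (st : String) (acc : Option String × Int) (c : String × String) : Option String × Int :=
  if pvP st c then (if pvKey c > acc.2 then (some c.2, pvKey c) else acc) else acc

/-- Max-tracking on the first-match result. -/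
def pvFStep (st : String) (r : Option (String × String)) (c : String × String) : Option (String × String) :=
  if pvP st c then
    (match r with
     | none => some c
     | some m => if pvKey c > pvKey m then some c else some m)
  else r

/-- View of a first-match result as A's state. -/
def pvV : Option (String × String) → Option String × Int
  | none => (none, 0)
  | some m => (some m.2, pvKey m)

lemma pvFirstMatch_eq_find? (st : String) (l : List (String × String)) :
    pvFirstMatch st l = (l.find? (pvP st)).map (·.2) := by
  induction l with
  | nil => rfl
  | cons c t ih =>
    cases h : PySem.Chars.isIn c.1.toList st.toList <;>
      simp [pvFirstMatch, List.find?_cons, pvP, PySem.Str.isIn, h, ih]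

/-- insertBy into a descending-by-key list stays descending. -/
lemma pvInsert_pairwise (x : String × String) (s : List (String × String))
    (hs : s.Pairwise (fun a b => pvKey b ≤ pvKey a)) :
    (PySem.List.insertBy pvBef x s).Pairwise (fun a b => pvKey b ≤ pvKey a) := by
  induction s with
  | nil => simp [PySem.List.insertBy]
  | cons y ys ih =>
    rcases List.pairwise_cons.mp hs with ⟨hy, hys⟩
    by_cases h : pvBef x y
    · have hxy : pvKey y < pvKey x := by simpa [pvBef] using h
      simp only [PySem.List.insertBy, h, if_pos]
      refine List.pairwise_cons.mpr ⟨?_, hs⟩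
      intro z hz
      rcases List.mem_cons.mp hz with rfl | hz'
      · omega
      · have := hy z hz'; omega
    · simp only [PySem.List.insertBy, h, Bool.false_eq_true, if_false]
      refine List.pairwise_cons.mpr ⟨?_, ih hys⟩
      intro z hz
      rcases (PySem.List.mem_insertBy pvBef x z ys).mp hz with rfl | hz'
      · have : ¬ pvKey y < pvKey z := by simpa [pvBef] using h
        omega
      · exact hy z hz'

/-- First match after inserting x into a descending list = A's max-tracking step. -/
lemma pvFind_insert (st : String) (x : String × String) (s : List (String × String))
    (hs : s.Pairwise (fun a b => pvKey b ≤ pvKey a)) :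
    (PySem.List.insertBy pvBef x s).find? (pvP st) = pvFStep st (s.find? (pvP st)) x := by
  induction s with
  | nil =>
    simp only [PySem.List.insertBy, List.find?_nil, pvFStep]
    by_cases h : pvP st x <;> simp [List.find?, h]
  | cons y ys ih =>
    rcases List.pairwise_cons.mp hs with ⟨hy, hys⟩
    by_cases h : pvBef x y
    · have hxy : pvKey y < pvKey x := by simpa [pvBef] using h
      simp only [PySem.List.insertBy, h, if_pos]
      by_cases hpx : pvP st x
      · rw [List.find?_cons_of_pos hpx]
        cases hf : (y :: ys).find? (pvP st) with
        | none => simp [pvFStep, hpx]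
        | some m =>
          have hm : m ∈ y :: ys := List.mem_of_find?_eq_some hf
          have hkm : pvKey m ≤ pvKey y := by
            rcases List.mem_cons.mp hm with rfl | hm'
            · omega
            · exact hy m hm'
          have : pvKey x > pvKey m := by omega
          simp [pvFStep, hpx, this]
      · rw [List.find?_cons_of_neg hpx]
        simp [pvFStep, hpx]
    · simp only [PySem.List.insertBy, h, Bool.false_eq_true, if_false]
      by_cases hpy : pvP st y
      · rw [List.find?_cons_of_pos hpy, List.find?_cons_of_pos hpy]
        have : ¬ pvKey x > pvKey y := by
          have : ¬ pvKey y < pvKey x := by simpa [pvBef] using h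
          omega
        by_cases hpx : pvP st x <;> simp [pvFStep, hpx, this]
      · rw [List.find?_cons_of_neg hpy, List.find?_cons_of_neg hpy]
        exact ih hys

/-- The view commutes A's step with the first-match step (keywords have length ≥ 3 > 0). -/
lemma pvV_fstep (st : String) (r : Option (String × String)) (x : String × String)
    (hx : 3 ≤ pvKey x) :
    pvV (pvFStep st r x) = pvStep st (pvV r) x := by
  cases r with
  | none =>
    by_cases h : pvP st x
    · have : pvKey x > (0 : Int) := by omega
      simp [pvFStep, pvStep, pvV, h, this]
    · simp [pvFStep, pvStep, pvV, h]
  | some m =>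
    by_cases h : pvP st x
    · by_cases hk : pvKey x > pvKey m <;> simp [pvFStep, pvStep, pvV, h, hk]
    · simp [pvFStep, pvStep, pvV, h]

/-- A's fold over the candidates simulates first-match over the growing sorted list. -/
lemma pvMain (st : String) (l : List (String × String)) (hl : ∀ x ∈ l, 3 ≤ pvKey x)
    (s : List (String × String)) (hs : s.Pairwise (fun a b => pvKey b ≤ pvKey a)) :
    l.foldl (pvStep st) (pvV (s.find? (pvP st)))
      = pvV ((l.foldl (fun acc x => PySem.List.insertBy pvBef x acc) s).find? (pvP st)) := by
  induction l generalizing s with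
  | nil => rfl
  | cons x t ih =>
    have hx : 3 ≤ pvKey x := hl x (by simp)
    have ht : ∀ y ∈ t, 3 ≤ pvKey y := fun y hy => hl y (by simp [hy])
    simp only [List.foldl_cons]
    rw [← pvV_fstep st _ x hx, ← pvFind_insert st x s hs]
    exact ih ht _ (pvInsert_pairwise x s hs)

/-- A's inner keyword loop equals the pvStep fold over the filtered candidate pairs. -/
lemma pvInner (st : String) (pid : String) (kws : List String) (acc : Option String × Int) :
    kws.foldl (fun (acc : Option String × Int) (kw : String) =>
      if PySem.Str.len kw < 3 then acc
      else if PySem.Str.isIn kw st then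
        (if PySem.Str.len kw > acc.2 then (some pid, PySem.Str.len kw) else acc)
      else acc) acc
    = ((kws.filter (fun kw => decide (3 ≤ PySem.Str.len kw))).map
        (fun kw => (kw, pid))).foldl (pvStep st) acc := by
  induction kws generalizing acc with
  | nil => rfl
  | cons kw t ih =>
    rw [List.foldl_cons, List.filter_cons]
    by_cases h3 : PySem.Str.len kw < 3
    · have hf : decide (3 ≤ PySem.Str.len kw) = false := by simp only [decide_eq_false_iff_not]; omega
      rw [if_pos h3, hf]
      simp only [Bool.false_eq_true, if_false]
      exact ih _
    · have hf : decide (3 ≤ PySem.Str.len kw) = true := by simp only [decide_eq_true_eq]; omega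
      rw [if_neg h3, hf]
      simp only [if_true, List.map_cons, List.foldl_cons]
      have hstep : (if PySem.Str.isIn kw st then
              (if PySem.Str.len kw > acc.2 then (some pid, PySem.Str.len kw) else acc)
            else acc) = pvStep st acc (kw, pid) := by
        simp [pvStep, pvP, pvKey]
      rw [hstep]
      exact ih _

-- ===== VERDICT (by name: the statement is the Claim_ definition above) =====
theorem find_best_project_match_py_spec : Claim_equal_find_best_project_match_py := by
  intro st pk _
  unfold Spec_find_best_project_match_py find_best_project_match_py find_best_project_match_py_alt
  set cands := pk.flatMap (fun p =>
    (p.2.filter (fun kw => decide (3 ≤ PySem.Str.len kw))).map (fun kw => (kw, p.1))) with hc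
  have hA : (pk.foldl (fun (acc : Option String × Int) (p : String × List String) =>
      p.2.foldl (fun (acc : Option String × Int) (kw : String) =>
        if PySem.Str.len kw < 3 then acc
        else if PySem.Str.isIn kw st then
          (if PySem.Str.len kw > acc.2 then (some p.1, PySem.Str.len kw) else acc)
        else acc) acc) (none, 0))
      = cands.foldl (pvStep st) (none, 0) := by
    rw [hc, List.foldl_flatMap]
    apply PySem.List.foldl_congr_mem
    intro acc p _
    exact pvInner st p.1 p.2 acc
  have h3 : ∀ x ∈ cands, 3 ≤ pvKey x := by
    intro x hx
    rw [hc] at hx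
    simp only [List.mem_flatMap, List.mem_map, List.mem_filter] at hx
    obtain ⟨p, _, kw, ⟨_, hkw⟩, rfl⟩ := hx
    simpa [pvKey] using of_decide_eq_true hkw
  have hmain := pvMain st cands h3 [] (by simp)
  simp only [List.find?_nil] at hmain
  have hsort : PySem.List.sorted cands (fun c => PySem.Str.len c.1) true
      = cands.foldl (fun acc x => PySem.List.insertBy pvBef x acc) [] := by
    rw [PySem.List.sorted_rev_eq_foldl_insertBy]
    rfl
  rw [pvFirstMatch_eq_find?, hsort, hA]
  show (cands.foldl (pvStep st) (pvV none)).1 = _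
  rw [hmain]
  cases ((cands.foldl (fun acc x => PySem.List.insertBy pvBef x acc) []).find? (pvP st)) <;> rfl
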